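-- pv_equiv track=rewrite | github.com/Sh3mm/truth-tables | possibility gen.py | returnSum
-- ===== SOURCE A (Python) =====
-- def returnSum(listof1, nbofVariables):
--     """makes the sun part of the product of sums with the positions of the 1s
--         accepts a list and a number of varriables to return a string"""
--     Sum = ""
--     for i in range(nbofVariables):
--         check = False
--         for j in listof1:
--             if i == j:
--                 check = True
--                 break
--         if check == True:
--             Sum += str(chr(65 + i))
--         else:
--             Sum += str(chr(65 + i)) + "'"
--
--     return Sum
-- ===== SOURCE B (Python) =====
-- def returnSum(listof1, nbofVariables):
--     """makes the sun part of the product of sums with the positions of the 1s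
--         accepts a list and a number of varriables to return a string"""
--     marks = sorted({j for j in listof1 if 0 <= j < nbofVariables})
--     pieces = []
--     prev = 0
--     for m in marks:
--         for i in range(prev, m):
--             pieces.append(chr(65 + i) + "'")
--         pieces.append(chr(65 + m))
--         prev = m + 1
--     for i in range(prev, nbofVariables):
--         pieces.append(chr(65 + i) + "'")
--     return "".join(pieces)
-- ===== Notes on version B (the rewrite author's own statement) =====
-- stated objective: faster
-- what changed: Instead of scanning listof1 for every i in range(nbofVariables), B dedupes and sorts the in-range marks once and then emits the string as runs: a primed gap segment before each mark, the unprimed mark letter, and a final primed tail segment.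
-- outside the precondition, e.g. on returnSum([], 1114048): A raises ValueError, B raises ValueError
import Mathlib
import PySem

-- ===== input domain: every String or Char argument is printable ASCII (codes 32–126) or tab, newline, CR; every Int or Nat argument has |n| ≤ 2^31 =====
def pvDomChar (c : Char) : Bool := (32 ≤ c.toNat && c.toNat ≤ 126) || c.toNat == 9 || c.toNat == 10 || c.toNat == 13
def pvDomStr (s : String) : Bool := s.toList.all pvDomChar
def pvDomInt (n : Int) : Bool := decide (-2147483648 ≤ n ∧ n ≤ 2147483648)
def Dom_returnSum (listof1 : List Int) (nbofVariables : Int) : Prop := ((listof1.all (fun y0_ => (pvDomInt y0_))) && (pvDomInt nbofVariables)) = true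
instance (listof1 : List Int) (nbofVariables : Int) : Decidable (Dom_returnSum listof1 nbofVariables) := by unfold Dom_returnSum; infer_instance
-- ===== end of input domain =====

-- B replaces A's nested membership scan by sort-then-merge: dedupe and sort the in-range
-- marks once, then emit the output as runs (primed gaps between consecutive marks): faster.


-- ===== PORT A =====
-- inner 'for j in listof1: if i == j: check = True; break'
def returnSumCheck (i : Int) : List Int → Bool
  | [] => false
  | j :: rest => if i == j then true else returnSumCheck i rest

def returnSum (listof1 : List Int) (nbofVariables : Int) : String :=
  (PySem.List.pyRange 0 nbofVariables 1).foldl (fun Sum i =>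
    if returnSumCheck i listof1 then Sum ++ String.singleton (Char.ofNat (65 + i).toNat)
    else Sum ++ String.singleton (Char.ofNat (65 + i).toNat) ++ "'") ""

-- ===== PORT B =====
-- 'for i in range(a, b): pieces.append(chr(65+i) + "'")' — a primed gap segment
def segPrimed (a b : Int) : List String :=
  (PySem.List.pyRange a b 1).map
    (fun i => String.singleton (Char.ofNat (65 + i).toNat) ++ "'")

-- the 'for m in marks' loop carrying prev, plus the final tail segment
def mergeMarks (n : Int) (prev : Int) : List Int → List String
  | [] => segPrimed prev n
  | m :: rest =>
      segPrimed prev m ++ [String.singleton (Char.ofNat (65 + m).toNat)] ++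
        mergeMarks n (m + 1) rest

def returnSum_alt (listof1 : List Int) (nbofVariables : Int) : String :=
  String.join
    (mergeMarks nbofVariables 0
      (PySem.List.sorted
        (PySem.Set.ofList
          (listof1.filter (fun j => decide (0 ≤ j) && decide (j < nbofVariables))))
        (fun x => x) false))

-- ===== PRECONDITION & SPEC =====
-- Pre_ excludes nbofVariables > 55231: beyond that chr(65+i) yields lone-surrogate (and,
-- from 1114048 on, invalid: A raises ValueError) codepoints, and a lone surrogate is a value
-- a Lean String cannot represent, so A's return value there leaves the declared Lean type.
def Pre_returnSum (listof1 : List Int) (nbofVariables : Int) : Prop := nbofVariables ≤ 55231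
instance (listof1 : List Int) (nbofVariables : Int) : Decidable (Pre_returnSum listof1 nbofVariables) := by unfold Pre_returnSum; infer_instance
def pvWitness_returnSum : List Int × Int := ([0, 2], 3)

def Spec_returnSum (listof1 : List Int) (nbofVariables : Int) (out : String) : Prop := out = returnSum_alt listof1 nbofVariables
instance (listof1 : List Int) (nbofVariables : Int) (out : String) : Decidable (Spec_returnSum listof1 nbofVariables out) := by unfold Spec_returnSum; infer_instance

-- ===== CLAIM (what is proved, stated in full; the proofs are below) =====
def Claim_equal_returnSum : Prop := ∀ (listof1 : List Int) (nbofVariables : Int), Dom_returnSum listof1 nbofVariables → Pre_returnSum listof1 nbofVariables → Spec_returnSum listof1 nbofVariables (returnSum listof1 nbofVariables)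

-- ===== LEMMAS AND PROOFS =====

-- A's inner scan is list membership
theorem check_eq_mem (i : Int) : ∀ (l : List Int), returnSumCheck i l = decide (i ∈ l) := by
  intro l
  induction l with
  | nil => simp [returnSumCheck]
  | cons j rest ih =>
    simp only [returnSumCheck, ih, List.mem_cons]
    by_cases h : i = j <;> simp [h]

-- fold of ++ over strings, peeled off the initial accumulator
theorem strfold : ∀ (L : List String) (s : String),
    L.foldl (fun r t => r ++ t) s = s ++ L.foldl (fun r t => r ++ t) "" := by
  intro L
  induction L with
  | nil => intro s; simp
  | cons x xs ih =>
    intro s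
    simp only [List.foldl_cons]
    rw [ih (s ++ x), ih ("" ++ x)]
    simp [String.append_assoc]

-- a string-fold of appended pieces is the join of the mapped pieces
theorem foldl_string_pieces (f : Int → String) : ∀ (L : List Int) (s : String),
    L.foldl (fun acc i => acc ++ f i) s = s ++ String.join (L.map f) := by
  intro L
  induction L with
  | nil => intro s; simp [String.join]
  | cons x xs ih =>
    intro s
    simp only [List.foldl_cons, List.map_cons, ih, String.join]
    rw [strfold (List.map f xs) ("" ++ f x)]
    simp [String.append_assoc]

-- the merge over strictly increasing in-range marks is the pointwise membership map
theorem merge_eq (n : Int) : ∀ (marks : List Int) (prev : Int),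
    marks.Pairwise (· < ·) → (∀ m ∈ marks, prev ≤ m ∧ m < n) →
    mergeMarks n prev marks
      = (PySem.List.pyRange prev n 1).map
          (fun i => String.singleton (Char.ofNat (65 + i).toNat) ++
            (if i ∈ marks then "" else "'")) := by
  intro marks
  induction marks with
  | nil =>
    intro prev _ _
    simp [mergeMarks, segPrimed]
  | cons m rest ih =>
    intro prev hpw hin
    obtain ⟨hprev, hmn⟩ := hin m (by simp)
    have hrest_gt : ∀ x ∈ rest, m < x := (List.pairwise_cons.1 hpw).1
    have hsplit : PySem.List.pyRange prev n 1
        = PySem.List.pyRange prev m 1 ++ PySem.List.pyRange m n 1 :=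
      PySem.List.pyRange_one_append prev m n hprev (by omega)
    have hcons : PySem.List.pyRange m n 1 = m :: PySem.List.pyRange (m + 1) n 1 :=
      PySem.List.pyRange_one_cons hmn
    rw [hsplit, hcons, List.map_append, List.map_cons]
    have hgap : segPrimed prev m
        = (PySem.List.pyRange prev m 1).map
            (fun i => String.singleton (Char.ofNat (65 + i).toNat) ++
              (if i ∈ m :: rest then "" else "'")) := by
      unfold segPrimed
      apply List.map_congr_left
      intro i hi
      have hib := (PySem.List.mem_pyRange_one).1 hi
      have hnot : i ∉ m :: rest := by
        intro hmem
        rcases List.mem_cons.1 hmem with h | h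
        · omega
        · have := hrest_gt i h; omega
      simp [hnot]
    have htail : mergeMarks n (m + 1) rest
        = (PySem.List.pyRange (m + 1) n 1).map
            (fun i => String.singleton (Char.ofNat (65 + i).toNat) ++
              (if i ∈ m :: rest then "" else "'")) := by
      rw [ih (m + 1) (List.pairwise_cons.1 hpw).2
          (fun x hx => ⟨by have := hrest_gt x hx; omega, (hin x (by simp [hx])).2⟩)]
      apply List.map_congr_left
      intro i hi
      have hib := (PySem.List.mem_pyRange_one).1 hi
      have hne : i ≠ m := by omega
      simp [List.mem_cons, hne]
    simp only [mergeMarks]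
    rw [hgap, htail, List.append_assoc]
    congr 1
    simp

-- ===== VERDICT (by name: the statement is the Claim_ definition above) =====
theorem returnSum_spec : Claim_equal_returnSum := by
  intro l n _ _
  unfold Spec_returnSum returnSum returnSum_alt
  -- A's fold as a join of mapped pieces
  have hA : (fun (Sum : String) (i : Int) =>
      if returnSumCheck i l then Sum ++ String.singleton (Char.ofNat (65 + i).toNat)
      else Sum ++ String.singleton (Char.ofNat (65 + i).toNat) ++ "'")
      = (fun (Sum : String) (i : Int) => Sum ++
          (String.singleton (Char.ofNat (65 + i).toNat) ++
            (if returnSumCheck i l then "" else "'"))) := by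
    funext Sum i; split_ifs <;> simp [← String.append_assoc]
  rw [hA, foldl_string_pieces
      (f := fun i => String.singleton (Char.ofNat (65 + i).toNat) ++
        (if returnSumCheck i l then "" else "'"))]
  simp only [String.empty_append]
  -- B's merge as the same join
  set marks := PySem.List.sorted
    (PySem.Set.ofList (l.filter (fun j => decide (0 ≤ j) && decide (j < n))))
    (fun x => x) false with hmarks
  have hpw : marks.Pairwise (· < ·) := PySem.List.sorted_ofList_pairwise_lt _
  have hmem : ∀ x, x ∈ marks ↔ (x ∈ l ∧ 0 ≤ x ∧ x < n) := by
    intro x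
    rw [hmarks, PySem.List.mem_sorted, PySem.Set.mem_ofList, List.mem_filter]
    simp
  rw [merge_eq n marks 0 hpw (fun m hm => by
    have := (hmem m).1 hm; exact ⟨this.2.1, this.2.2⟩)]
  congr 1
  apply List.map_congr_left
  intro i hi
  have hib := (PySem.List.mem_pyRange_one).1 hi
  have : (i ∈ marks) ↔ i ∈ l := by
    rw [hmem i]; constructor
    · exact fun h => h.1
    · exact fun h => ⟨h, hib.1, hib.2⟩
  rw [check_eq_mem]
  by_cases h : i ∈ l <;> simp [h, this]
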